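-- pv_equiv track=rewrite | github.com/Anspar-Org/elspais | src/elspais/graph/parsers/lark/__init__.py | _neutralize_fenced_blocks
-- ===== SOURCE A (Python) =====
-- def _neutralize_fenced_blocks(content: str) -> str:
--     """Replace content inside fenced code blocks with neutral text.
--
--     Fenced code blocks (```...```) may contain example requirement or
--     journey syntax that should not be parsed as actual content. This
--     replaces each line inside a fence with a neutral comment that the
--     grammar will match as TEXT/remainder, preserving line count.
--     """
--     lines = content.split("\n")
--     result: list[str] = []
--     in_fence = False
--     for line in lines:
--         stripped = line.strip()
--         if stripped.startswith("```") and not in_fence: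
--             in_fence = True
--             result.append(line)  # keep the opening fence marker as-is
--         elif stripped.startswith("```") and in_fence:
--             in_fence = False
--             result.append(line)  # keep the closing fence marker as-is
--         elif in_fence:
--             # Replace with a neutral line that won't match any grammar rule
--             result.append("<!-- fenced -->" if line.strip() else "")
--         else:
--             result.append(line)
--     return "\n".join(result)
-- ===== SOURCE B (Python) =====
-- def _neutralize_fenced_blocks(content: str) -> str:
--     """Two-level loop: an outer loop copies text verbatim until it meets a
--     fence marker; after a marker, an inner loop neutralizes every line up to
--     (and keeps) the matching closing marker. No boolean state flag."""
--     lines = content.split("\n")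
--     out = []
--     i, n = 0, len(lines)
--     while i < n:                                   # outside any fence
--         line = lines[i]
--         i += 1
--         out.append(line)
--         if line.strip().startswith("```"):         # opening marker kept
--             while i < n and not lines[i].strip().startswith("```"):
--                 out.append("<!-- fenced -->" if lines[i].strip() else "")
--                 i += 1
--             if i < n:                              # closing marker kept
--                 out.append(lines[i])
--                 i += 1
--     return "\n".join(out)
-- ===== Notes on version B (the rewrite author's own statement) =====
-- stated objective: alternative
-- what changed: Replaced A's single pass carrying an in_fence boolean flag with a flag-free two-level loop: an outer loop copies lines verbatim until a fence marker, then an inner loop neutralizes lines up to the matching closing marker.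
import Mathlib
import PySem

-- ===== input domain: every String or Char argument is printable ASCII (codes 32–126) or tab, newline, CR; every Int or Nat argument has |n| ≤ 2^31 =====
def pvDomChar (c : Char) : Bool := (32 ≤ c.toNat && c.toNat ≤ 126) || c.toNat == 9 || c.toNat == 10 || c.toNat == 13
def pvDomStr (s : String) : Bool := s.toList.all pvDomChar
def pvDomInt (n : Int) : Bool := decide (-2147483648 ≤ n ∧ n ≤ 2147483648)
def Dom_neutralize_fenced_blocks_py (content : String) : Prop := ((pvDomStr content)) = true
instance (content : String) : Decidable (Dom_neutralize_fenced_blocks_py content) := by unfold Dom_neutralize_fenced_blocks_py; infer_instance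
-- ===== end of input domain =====

-- B replaces A's single pass with an in_fence boolean flag by a flag-free
-- two-level loop (outer loop copies, inner loop neutralizes a fenced region);
-- objective: alternative decomposition, same cost.

-- ===== PORT A =====
-- loop body of A's for-loop, on the state (result, in_fence)
def nfbStep (st : List String × Bool) (line : String) : List String × Bool :=
  let result := st.1
  let in_fence := st.2
  let stripped := PySem.Str.strip line
  if PySem.Str.startswith stripped "```" && !in_fence then
    (result ++ [line], true)        -- keep the opening fence marker as-is
  else if PySem.Str.startswith stripped "```" && in_fence then
    (result ++ [line], false)       -- keep the closing fence marker as-is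
  else if in_fence then
    (result ++ [if PySem.Str.strip line ≠ "" then "<!-- fenced -->" else ""], in_fence)
  else
    (result ++ [line], in_fence)

def neutralize_fenced_blocks_py (content : String) : String :=
  let lines := (PySem.Str.split? content "\n").getD []
  let st := lines.foldl nfbStep ([], false)
  PySem.Str.join "\n" st.1

-- ===== PORT B =====
-- outer while-loop (outside any fence) / inner while-loop (inside a fence),
-- each transcribed as recursion on the remaining suffix of lines
mutual
def nfbOuter : List String → List String
  | [] => []
  | line :: rest =>
    if PySem.Str.startswith (PySem.Str.strip line) "```" then
      line :: nfbInner rest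
    else
      line :: nfbOuter rest
def nfbInner : List String → List String
  | [] => []
  | line :: rest =>
    if PySem.Str.startswith (PySem.Str.strip line) "```" then
      line :: nfbOuter rest         -- closing marker kept, back to outer loop
    else
      (if PySem.Str.strip line ≠ "" then "<!-- fenced -->" else "") :: nfbInner rest
end

def neutralize_fenced_blocks_py_alt (content : String) : String :=
  PySem.Str.join "\n" (nfbOuter ((PySem.Str.split? content "\n").getD []))

-- ===== PRECONDITION & SPEC =====
def Spec_neutralize_fenced_blocks_py (content : String) (out : String) : Prop := out = neutralize_fenced_blocks_py_alt content
instance (content : String) (out : String) : Decidable (Spec_neutralize_fenced_blocks_py content out) := by unfold Spec_neutralize_fenced_blocks_py; infer_instance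

-- ===== CLAIM (what is proved, stated in full; the proofs are below) =====
def Claim_equal_neutralize_fenced_blocks_py : Prop := ∀ (content : String), Dom_neutralize_fenced_blocks_py content → Spec_neutralize_fenced_blocks_py content (neutralize_fenced_blocks_py content)

-- ===== LEMMAS AND PROOFS =====

-- A's fold with in_fence = false builds acc ++ nfbOuter ls, and with
-- in_fence = true builds acc ++ nfbInner ls.
lemma nfb_fold : ∀ (ls : List String) (acc : List String),
    (ls.foldl nfbStep (acc, false)).1 = acc ++ nfbOuter ls
  ∧ (ls.foldl nfbStep (acc, true)).1 = acc ++ nfbInner ls := by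
  intro ls
  induction ls with
  | nil => intro acc; simp [nfbOuter, nfbInner]
  | cons l rest ih =>
    intro acc
    by_cases h : PySem.Chars.startswith (PySem.Chars.strip l.toList) ['`', '`', '`'] = true
    · constructor
      · simp [List.foldl, nfbStep, nfbOuter, h, (ih _).2]
      · simp [List.foldl, nfbStep, nfbInner, h, (ih _).1]
    · constructor
      · simp [List.foldl, nfbStep, nfbOuter, h, (ih _).1]
      · simp [List.foldl, nfbStep, nfbInner, h, (ih _).2]

-- ===== VERDICT (by name: the statement is the Claim_ definition above) =====
theorem neutralize_fenced_blocks_py_spec : Claim_equal_neutralize_fenced_blocks_py := by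
  intro content _
  unfold Spec_neutralize_fenced_blocks_py neutralize_fenced_blocks_py neutralize_fenced_blocks_py_alt
  simp [(nfb_fold ((PySem.Str.split? content "\n").getD []) []).1]
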